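-- pv_equiv track=rewrite | github.com/introduction-to-python-2026/ps-5-shiradahan150 | string_utils.py | split_before_each_uppercases
-- ===== SOURCE A (Python) =====
-- def split_before_each_uppercases(formula):
--   if not formula:
--     return []
--
--   index = 0
--   split_string = []
--
--   for i, char in enumerate(formula):
--
--     if char.isupper() and index < i:
--       split_string.append(formula[index:i])
--       index = i
--
--   split_string.append(formula[index:])
--
--   return split_string
-- ===== SOURCE B (Python) =====
-- def split_before_each_uppercases(formula):
--     # right-to-left single pass: collect the current piece's characters,
--     # close the piece whenever the char is uppercase; no indices or slicing.
--     pieces = []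
--     cur = []  # characters of the current piece, in right-to-left order
--     for ch in reversed(formula):
--         cur.append(ch)
--         if ch.isupper():
--             pieces.append(''.join(reversed(cur)))
--             cur = []
--     if cur:
--         pieces.append(''.join(reversed(cur)))
--     pieces.reverse()
--     return pieces
-- ===== Notes on version B (the rewrite author's own statement) =====
-- stated objective: alternative
-- what changed: A scans left-to-right with enumerate, a running slice-start index and string slicing; B does a single right-to-left pass that accumulates the current piece character by character and closes it at each uppercase letter, with no indices or slices.
import Mathlib
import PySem

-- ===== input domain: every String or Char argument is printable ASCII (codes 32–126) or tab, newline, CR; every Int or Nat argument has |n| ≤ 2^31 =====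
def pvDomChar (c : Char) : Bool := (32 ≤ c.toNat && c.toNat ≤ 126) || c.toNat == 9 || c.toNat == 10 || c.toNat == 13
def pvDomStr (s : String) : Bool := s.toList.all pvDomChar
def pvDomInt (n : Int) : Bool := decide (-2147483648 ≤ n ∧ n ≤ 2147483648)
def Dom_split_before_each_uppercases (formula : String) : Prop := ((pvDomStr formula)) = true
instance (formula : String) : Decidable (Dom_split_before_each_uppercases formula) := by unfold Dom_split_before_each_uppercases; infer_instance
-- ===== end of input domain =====

-- B changes the traversal: one right-to-left pass accumulating the current piece, no indices/slices (objective: alternative).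

-- ===== PORT A =====
-- loop body of A's 'for i, char in enumerate(formula)'
def pvStepA (cs : List Char) (st : Int × List String) (p : Int × Char) : Int × List String :=
  if PySem.Chars.isupper p.2 && decide (st.1 < p.1) then
    (p.1, st.2 ++ [String.ofList (PySem.List.slice cs (some st.1) (some p.1))])
  else st

def split_before_each_uppercases (formula : String) : List String :=
  if formula.toList.isEmpty then []
  else
    let st := (PySem.List.enumerate formula.toList 0).foldl (pvStepA formula.toList) (0, [])
    st.2 ++ [String.ofList (PySem.List.slice formula.toList (some st.1) none)]

-- ===== PORT B =====
-- loop body of B's reversed pass (foldr = iterate the string from the right)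
def pvAltStep (c : Char) (st : List Char × List String) : List Char × List String :=
  if PySem.Chars.isupper c then ([], String.ofList (st.1 ++ [c]).reverse :: st.2)
  else (st.1 ++ [c], st.2)

def split_before_each_uppercases_alt (formula : String) : List String :=
  let st := formula.toList.foldr pvAltStep ([], [])
  if st.1.isEmpty then st.2 else String.ofList st.1.reverse :: st.2

-- ===== PRECONDITION & SPEC =====
def Spec_split_before_each_uppercases (formula : String) (out : List String) : Prop := out = split_before_each_uppercases_alt formula
instance (formula : String) (out : List String) : Decidable (Spec_split_before_each_uppercases formula out) := by unfold Spec_split_before_each_uppercases; infer_instance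

-- ===== CLAIM (what is proved, stated in full; the proofs are below) =====
def Claim_equal_split_before_each_uppercases : Prop := ∀ (formula : String), Dom_split_before_each_uppercases formula → Spec_split_before_each_uppercases formula (split_before_each_uppercases formula)

-- ===== LEMMAS AND PROOFS =====

-- the not-uppercase predicate both programs branch on
def pvLow (d : Char) : Bool := !PySem.Chars.isupper d

-- the chunk list both programs compute: a piece is 'head char ++ following non-uppercase run'
def pvS : List Char → List String
  | [] => []
  | c :: t =>
      String.ofList (c :: t.takeWhile pvLow) :: pvS (t.dropWhile pvLow)
termination_by l => l.length
decreasing_by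
  have h1 := List.length_dropWhile_le (p := pvLow) (l := t)
  simp; omega

-- chunks of pre ++ l where pre is the in-progress piece
def pvSfrom (pre l : List Char) : List String :=
  match h : l.dropWhile pvLow with
  | [] => [String.ofList (pre ++ l)]
  | d :: r => String.ofList (pre ++ l.takeWhile pvLow) :: pvSfrom [d] r
termination_by l.length
decreasing_by
  have h1 := List.length_dropWhile_le (p := pvLow) (l := l)
  rw [h] at h1; simp at h1; omega

theorem pvSfrom_single (n : Nat) (t : List Char) (c : Char) (hn : t.length = n) :
    pvSfrom [c] t = pvS (c :: t) := by
  induction n using Nat.strong_induction_on generalizing t c with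
  | _ n ih =>
    rw [pvSfrom, pvS]
    cases h : t.dropWhile pvLow with
    | nil =>
      have : t.takeWhile pvLow = t := by
        conv_rhs => rw [← List.takeWhile_append_dropWhile (p := pvLow) (l := t)]
        rw [h, List.append_nil]
      simp [this, h, pvS]
    | cons d r =>
      have hlt : r.length < t.length := by
        have h1 := List.length_dropWhile_le (p := pvLow) (l := t)
        rw [h] at h1; simp at h1; omega
      simp [ih r.length (by omega) r d rfl, h]

-- B's fold state: (current piece = leading non-uppercase run, pieces of the rest)
theorem pvStateB (l : List Char) :
    l.foldr pvAltStep ([], []) = ((l.takeWhile pvLow).reverse, pvS (l.dropWhile pvLow)) := by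
  induction l with
  | nil => simp [pvS]
  | cons c t ih =>
    by_cases hc : PySem.Chars.isupper c = true
    · simp [pvAltStep, ih, hc, List.takeWhile_cons, List.dropWhile_cons, pvLow]
      rw [pvS]
    · simp [pvAltStep, ih, hc, List.takeWhile_cons, List.dropWhile_cons, pvLow]

theorem pvB_eq_S (formula : String) :
    split_before_each_uppercases_alt formula = pvS formula.toList := by
  unfold split_before_each_uppercases_alt
  rw [pvStateB]
  cases h : formula.toList with
  | nil => simp [pvS]
  | cons c t =>
    by_cases hc : PySem.Chars.isupper c = true
    · simp [pvLow, hc]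
    · simp [pvLow, hc, pvS]

-- the head of a non-empty dropWhile fails the predicate
theorem pvDropWhile_head {α : Type} (p : α → Bool) :
    ∀ (l : List α) (d : α) (r : List α), l.dropWhile p = d :: r → p d = false := by
  intro l
  induction l with
  | nil => intro d r h; simp [List.dropWhile] at h
  | cons c t ih =>
    intro d r h
    rw [List.dropWhile_cons] at h
    by_cases hc : p c = true
    · rw [if_pos hc] at h; exact ih d r h
    · rw [if_neg hc] at h
      cases h
      simpa using hc

-- non-uppercase characters leave A's fold state unchanged
theorem pvFold_low (cs : List Char) (u : List Char) (hu : ∀ x ∈ u, pvLow x = true) :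
    ∀ (j : Int) (st : Int × List String),
      (PySem.List.enumerate u j).foldl (pvStepA cs) st = st := by
  induction u with
  | nil => intro j st; simp [PySem.List.enumerate_nil]
  | cons c t ih =>
    intro j st
    have hc : PySem.Chars.isupper c = false := by
      have := hu c (by simp); simpa [pvLow] using this
    rw [PySem.List.enumerate_cons, List.foldl_cons]
    rw [show pvStepA cs st (j, c) = st by simp [pvStepA, hc]]
    exact ih (fun x hx => hu x (by simp [hx])) (j + 1) st

-- main invariant of A's fold, by chunks
theorem pvA_chunks (cs : List Char) (n : Nat) :
    ∀ (l : List Char) (j idx : Int) (acc : List String),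
      l.length = n → 0 ≤ idx → idx < j → j + l.length = cs.length →
      cs.drop j.toNat = l →
      (let st := (PySem.List.enumerate l j).foldl (pvStepA cs) (idx, acc)
       st.2 ++ [String.ofList (PySem.List.slice cs (some st.1) none)])
        = acc ++ pvSfrom ((cs.drop idx.toNat).take (j - idx).toNat) l := by
  induction n using Nat.strong_induction_on with
  | _ n ih =>
    intro l j idx acc hn hidx0 hij hlen hdrop
    have hjle : j.toNat ≤ cs.length := by omega
    have hpre : cs.drop idx.toNat = (cs.drop idx.toNat).take (j - idx).toNat ++ l := by
      conv_lhs => rw [← List.take_append_drop (j - idx).toNat (cs.drop idx.toNat)]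
      rw [List.drop_drop]
      congr 1
      rw [← hdrop]; congr 1; omega
    have hprelen : ((cs.drop idx.toNat).take (j - idx).toNat).length = (j - idx).toNat := by
      simp; omega
    rw [pvSfrom]
    cases h : l.dropWhile pvLow with
    | nil =>
      have hall : ∀ x ∈ l, pvLow x = true := by
        intro x hx
        have : l.takeWhile pvLow = l := by
          conv_rhs => rw [← List.takeWhile_append_dropWhile (p := pvLow) (l := l)]
          rw [h, List.append_nil]
        rw [← this] at hx
        exact List.mem_takeWhile_imp hx
      simp only [pvFold_low cs l hall j (idx, acc)]
      rw [PySem.List.slice_from _ hidx0, ← hpre]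
    | cons d r =>
      have hd : PySem.Chars.isupper d = true := by
        have hdl := pvDropWhile_head pvLow l d r h
        simpa [pvLow] using hdl
      have hsplit : l = l.takeWhile pvLow ++ (d :: r) := by
        conv_lhs => rw [← List.takeWhile_append_dropWhile (p := pvLow) (l := l)]
        rw [h]
      set u := l.takeWhile pvLow with hu
      have hl2 : l.length = u.length + r.length + 1 := by
        conv_lhs => rw [hsplit]
        simp
        omega
      have hl2' : (l.length : Int) = (u.length : Int) + r.length + 1 := by
        exact_mod_cast hl2
      have hrlen : r.length < n := by omega
      have hk0 : (0:Int) ≤ j + u.length := by omega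
      -- split the enumeration at the uppercase position
      rw [show PySem.List.enumerate l j
            = PySem.List.enumerate u j ++ PySem.List.enumerate (d :: r) (j + u.length) by
          conv_lhs => rw [hsplit]
          rw [PySem.List.enumerate_append]]
      rw [List.foldl_append]
      rw [pvFold_low cs u (fun x hx => List.mem_takeWhile_imp hx) j (idx, acc)]
      rw [PySem.List.enumerate_cons, List.foldl_cons]
      have hstep : pvStepA cs (idx, acc) ((j : Int) + u.length, d)
          = (j + u.length,
             acc ++ [String.ofList (PySem.List.slice cs (some idx) (some (j + u.length)))]) := by
        have hlt : idx < j + (u.length : Int) := by omega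
        simp [pvStepA, hd, hlt]
      rw [hstep]
      have hdropk : cs.drop (j.toNat + u.length) = d :: r := by
        have : cs.drop (j.toNat + u.length) = (cs.drop j.toNat).drop u.length := by
          simp [List.drop_drop, Nat.add_comm]
        rw [this, hdrop]
        conv_lhs => rw [hsplit]
        simp
      have hdropk1 : cs.drop ((j + u.length + 1 : Int)).toNat = r := by
        have h1 : ((j + u.length + 1 : Int)).toNat = (j.toNat + u.length) + 1 := by omega
        rw [h1, ← List.drop_drop, hdropk]
        simp
      have hIH := ih r.length hrlen r (j + u.length + 1) (j + u.length)
        (acc ++ [String.ofList (PySem.List.slice cs (some idx) (some (j + u.length)))])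
        rfl (by omega) (by omega) (by omega) hdropk1
      rw [hIH]
      -- identify the two pieces
      have hslice : PySem.List.slice cs (some idx) (some (j + u.length))
          = (cs.drop idx.toNat).take (j - idx).toNat ++ u := by
        rw [PySem.List.slice_toNat cs hidx0 hk0]
        conv_lhs => rw [hpre, hsplit, ← List.append_assoc]
        refine List.take_left' ?_
        simp [hprelen]
        omega
      have hpre' : (cs.drop ((j + u.length : Int)).toNat).take ((j + u.length + 1) - (j + u.length)).toNat = [d] := by
        have h3 : ((j + u.length : Int)).toNat = j.toNat + u.length := by omega
        rw [h3, hdropk]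
        norm_num
      rw [hslice, hpre']
      simp

-- ===== VERDICT (by name: the statement is the Claim_ definition above) =====
theorem split_before_each_uppercases_spec : Claim_equal_split_before_each_uppercases := by
  intro formula _
  unfold Spec_split_before_each_uppercases
  rw [pvB_eq_S]
  unfold split_before_each_uppercases
  cases h : formula.toList with
  | nil => simp [h, pvS]
  | cons c t =>
    simp only [h, List.isEmpty_cons, if_neg (by decide : ¬(false = true))]
    rw [PySem.List.enumerate_cons, List.foldl_cons]
    rw [show pvStepA (c :: t) ((0:Int), ([] : List String)) (0, c) = (0, []) by
      simp [pvStepA]]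
    have e1 : PySem.List.enumerate t ((0:Int) + 1) = PySem.List.enumerate t 1 := by norm_num
    rw [e1]
    have := pvA_chunks (c :: t) t.length t 1 0 [] rfl (by omega) (by omega)
      (by simp only [List.length_cons]; push_cast; omega) (by simp)
    simp only at this
    rw [this]
    have : ((c :: t).drop (0:Int).toNat).take ((1:Int) - 0).toNat = [c] := by norm_num
    rw [this]
    simpa using pvSfrom_single t.length t c rfl
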